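-- pv_equiv track=rewrite | github.com/jeremy2lin-dot/tw-daily-stock-picker | src/tw_stock_picker/data.py | _previous_by_date
-- ===== SOURCE A (Python) =====
-- def _previous_by_date(rows: list[dict], latest_date: str) -> dict | None:
--     previous_dates = sorted({str(row.get("date", "")) for row in rows if str(row.get("date", "")) < latest_date})
--     if not previous_dates:
--         return None
--     previous_date = previous_dates[-1]
--     for row in rows:
--         if str(row.get("date", "")) == previous_date:
--             return row
--     return None
-- ===== SOURCE B (Python) =====
-- def _previous_by_date(rows: list[dict], latest_date: str) -> dict | None:
--     best_row = None
--     best_date = None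
--     for row in rows:
--         d = str(row.get("date", ""))
--         if d < latest_date and (best_date is None or d > best_date):
--             best_row, best_date = row, d
--     return best_row
-- ===== Notes on version B (the rewrite author's own statement) =====
-- stated objective: simpler
-- what changed: Replaced A's three phases (build a set of qualifying dates, sort it, take the last, then rescan for the first matching row) by one fused pass that keeps the best row and best qualifying date seen so far, using strict > so the first row carrying the maximal date wins.
import Mathlib
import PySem

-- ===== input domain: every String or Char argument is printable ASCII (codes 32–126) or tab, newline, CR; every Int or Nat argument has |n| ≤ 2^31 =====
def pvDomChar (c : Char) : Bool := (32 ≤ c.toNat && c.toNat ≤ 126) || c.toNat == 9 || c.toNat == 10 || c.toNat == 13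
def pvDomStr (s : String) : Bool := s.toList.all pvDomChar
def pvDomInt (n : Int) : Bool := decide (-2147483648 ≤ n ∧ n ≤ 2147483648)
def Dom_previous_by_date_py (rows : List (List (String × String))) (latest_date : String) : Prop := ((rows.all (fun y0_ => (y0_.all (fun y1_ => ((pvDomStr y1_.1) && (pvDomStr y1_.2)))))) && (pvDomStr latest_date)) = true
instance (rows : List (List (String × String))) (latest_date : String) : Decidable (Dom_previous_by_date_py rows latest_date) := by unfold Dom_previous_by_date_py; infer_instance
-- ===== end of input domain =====

-- B replaces A's set-comprehension + sort + second scan by one fused pass keeping the best row/date so far (objective: simpler).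

-- ===== PORT A =====
-- str(row.get("date", "")): values are strings here, so str(...) is the identity; row.get = PySem.Dict.getD
def previous_by_date_py (rows : List (List (String × String))) (latest_date : String) : Option (List (String × String)) :=
  let previous_dates : List String :=
    PySem.List.sorted
      (PySem.Set.ofList ((rows.filter (fun row => decide (PySem.Dict.getD (PySem.Dict.mk row) "date" "" < latest_date))).map
        (fun row => PySem.Dict.getD (PySem.Dict.mk row) "date" "")))
      (fun x => x) false
  if previous_dates = [] then none
  else
    let previous_date := PySem.List.pyGetD previous_dates (-1) ""
    rows.find? (fun row => PySem.Dict.getD (PySem.Dict.mk row) "date" "" == previous_date)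

-- ===== PORT B =====
def previous_by_date_py_alt (rows : List (List (String × String))) (latest_date : String) : Option (List (String × String)) :=
  (rows.foldl
    (fun (best : Option (List (String × String)) × Option String) row =>
      let d := PySem.Dict.getD (PySem.Dict.mk row) "date" ""
      if decide (d < latest_date) && (match best.2 with
                                      | none => true
                                      | some bd => decide (bd < d)) then
        (some row, some d)
      else best)
    (none, none)).1

-- ===== PRECONDITION & SPEC =====
def Spec_previous_by_date_py (rows : List (List (String × String))) (latest_date : String) (out : Option (List (String × String))) : Prop := out = previous_by_date_py_alt rows latest_date
instance (rows : List (List (String × String))) (latest_date : String) (out : Option (List (String × String))) : Decidable (Spec_previous_by_date_py rows latest_date out) := by unfold Spec_previous_by_date_py; infer_instance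

-- ===== CLAIM (what is proved, stated in full; the proofs are below) =====
def Claim_equal_previous_by_date_py : Prop := ∀ (rows : List (List (String × String))) (latest_date : String), Dom_previous_by_date_py rows latest_date → Spec_previous_by_date_py rows latest_date (previous_by_date_py rows latest_date)

-- ===== LEMMAS AND PROOFS =====

-- date of a row
def pvD (row : List (String × String)) : String := PySem.Dict.getD (PySem.Dict.mk row) "date" ""

-- qualifying dates of the rows, in order
def pvQD (rows : List (List (String × String))) (L : String) : List String :=
  (rows.filter (fun row => decide (pvD row < L))).map pvD

-- B's fold step
def pvStep (L : String) (best : Option (List (String × String)) × Option String)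
    (row : List (String × String)) : Option (List (String × String)) × Option String :=
  if decide (pvD row < L) && (match best.2 with
                              | none => true
                              | some bd => decide (bd < pvD row)) then
    (some row, some (pvD row))
  else best

theorem pvAlt_eq_foldl (rows : List (List (String × String))) (L : String) :
    previous_by_date_py_alt rows L = (rows.foldl (pvStep L) (none, none)).1 := rfl

-- the canonical state B reaches after scanning rows
def pvState (rows : List (List (String × String))) (L : String) :
    Option (List (String × String)) × Option String :=
  match (pvQD rows L).max? with
  | none => (none, none)
  | some m => (rows.find? (fun row => pvD row == m), some m)

theorem pvInv (L : String) (rows : List (List (String × String))) :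
    rows.foldl (pvStep L) (none, none) = pvState rows L := by
  induction rows using List.reverseRecOn with
  | nil => rfl
  | append_singleton rs r ih =>
    rw [List.foldl_append, List.foldl_cons, List.foldl_nil, ih]
    have hqd : pvQD (rs ++ [r]) L
        = pvQD rs L ++ (if decide (pvD r < L) then [pvD r] else []) := by
      unfold pvQD
      rw [List.filter_append, List.map_append]
      by_cases hq : pvD r < L <;>
        simp only [hq, List.filter_cons, List.filter_nil, decide_true, decide_false,
          if_true, if_false, Bool.false_eq_true, List.map_cons, List.map_nil]
    unfold pvState pvStep
    by_cases hq : pvD r < L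
    · cases hm : (pvQD rs L).max? with
      | none =>
        have hnil : pvQD rs L = [] := List.max?_eq_none_iff.mp hm
        have hmax' : (pvQD (rs ++ [r]) L).max? = some (pvD r) := by
          rw [hqd, hnil]; simp [hq]
        have hnone : rs.find? (fun row => pvD row == pvD r) = none := by
          rw [List.find?_eq_none]
          intro row hrow hpr
          have : pvD row ∈ pvQD rs L := by
            unfold pvQD
            have : pvD row < L := by
              have := eq_of_beq hpr; rw [this]; exact hq
            exact List.mem_map_of_mem (List.mem_filter.mpr ⟨hrow, by simpa using this⟩)
          rw [hnil] at this; exact absurd this (List.not_mem_nil)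
        rw [hmax']
        simp [hq, List.find?_append, hnone]
      | some m =>
        obtain ⟨hmem, hub⟩ := List.max?_eq_some_iff.mp hm
        have hsome : (rs.find? (fun row => pvD row == m)).isSome := by
          rw [List.find?_isSome]
          obtain ⟨row, hrow, hdm⟩ := List.exists_of_mem_map (by unfold pvQD at hmem; exact hmem)
          exact ⟨row, (List.mem_filter.mp hrow).1, by simp [hdm]⟩
        by_cases hlt : m < pvD r
        · have hmax' : (pvQD (rs ++ [r]) L).max? = some (pvD r) := by
            rw [List.max?_eq_some_iff]
            constructor
            · rw [hqd]; simp [hq]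
            · intro b hb
              rw [hqd] at hb; simp [hq] at hb
              rcases hb with hb | hb
              · exact le_of_lt (lt_of_le_of_lt (hub b hb) hlt)
              · exact le_of_eq hb
          have hnone : rs.find? (fun row => pvD row == pvD r) = none := by
            rw [List.find?_eq_none]
            intro row hrow hpr
            have heq : pvD row = pvD r := eq_of_beq hpr
            have : pvD row ∈ pvQD rs L := by
              unfold pvQD
              exact List.mem_map_of_mem (List.mem_filter.mpr ⟨hrow, by simp [heq, hq]⟩)
            exact absurd (hub _ this) (by rw [heq]; exact not_le_of_gt hlt)
          rw [hmax']
          simp [hq, hlt, List.find?_append, hnone]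
        · have hmax' : (pvQD (rs ++ [r]) L).max? = some m := by
            rw [List.max?_eq_some_iff]
            constructor
            · rw [hqd]; exact List.mem_append_left _ hmem
            · intro b hb
              rw [hqd] at hb; simp [hq] at hb
              rcases hb with hb | hb
              · exact hub b hb
              · rw [hb]; exact le_of_not_gt hlt
          rw [hmax']
          have hfind : (rs ++ [r]).find? (fun row => pvD row == m)
              = rs.find? (fun row => pvD row == m) := by
            rw [List.find?_append]
            obtain ⟨v, hv⟩ := Option.isSome_iff_exists.mp hsome
            rw [hv]; rfl
          simp [hq, hlt, hfind]
    · cases hm : (pvQD rs L).max? with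
      | none =>
        have hnil : pvQD rs L = [] := List.max?_eq_none_iff.mp hm
        have : (pvQD (rs ++ [r]) L).max? = none := by
          rw [List.max?_eq_none_iff, hqd, hnil]; simp [hq]
        rw [this]; simp [hq]
      | some m =>
        obtain ⟨hmem, hub⟩ := List.max?_eq_some_iff.mp hm
        have hsome : (rs.find? (fun row => pvD row == m)).isSome := by
          rw [List.find?_isSome]
          obtain ⟨row, hrow, hdm⟩ := List.exists_of_mem_map (by unfold pvQD at hmem; exact hmem)
          exact ⟨row, (List.mem_filter.mp hrow).1, by simp [hdm]⟩
        have hmax' : (pvQD (rs ++ [r]) L).max? = some m := by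
          rw [hqd]; simp [hq]; exact hm
        rw [hmax']
        have hfind : (rs ++ [r]).find? (fun row => pvD row == m)
            = rs.find? (fun row => pvD row == m) := by
          rw [List.find?_append]
          obtain ⟨v, hv⟩ := Option.isSome_iff_exists.mp hsome
          rw [hv]; rfl
        simp [hq, hfind]

-- last element of a ≤-pairwise list is an upper bound
theorem pvLeGetLast {l : List String} (hp : l.Pairwise (· ≤ ·)) (h : l ≠ []) :
    ∀ x ∈ l, x ≤ l.getLast h := by
  induction l with
  | nil => simp
  | cons a t ih =>
    obtain ⟨ha, ht⟩ := List.pairwise_cons.mp hp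
    intro x hx
    cases t with
    | nil => simp at hx; simp [hx, List.getLast]
    | cons b t' =>
      rw [List.getLast_cons (by simp)]
      rcases List.mem_cons.mp hx with rfl | hx'
      · exact ha _ (List.getLast_mem _)
      · exact ih ht (by simp) x hx'

-- sorted(set(qd)) is empty iff qd is
theorem pvNilIff (qd : List String) :
    PySem.List.sorted (PySem.Set.ofList qd) (fun x => x) false = [] ↔ qd = [] := by
  rw [PySem.List.sorted_eq_nil_iff]
  constructor
  · intro h
    rw [List.eq_nil_iff_forall_not_mem]
    intro x hx
    have := (PySem.Set.mem_ofList qd x).mpr hx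
    rw [h] at this; exact absurd this (List.not_mem_nil)
  · intro h; rw [h]; rfl

-- last of sorted(set(qd)) is the maximum of qd
theorem pvMaxChar (qd : List String)
    (h : PySem.List.sorted (PySem.Set.ofList qd) (fun x => x) false ≠ []) :
    qd.max? = some ((PySem.List.sorted (PySem.Set.ofList qd) (fun x => x) false).getLast h) := by
  set S := PySem.List.sorted (PySem.Set.ofList qd) (fun x => x) false with hS
  have hperm := PySem.List.sorted_perm (PySem.Set.ofList qd) (fun x => x) false
  have hmemS : ∀ x, x ∈ S ↔ x ∈ qd := by
    intro x
    rw [hperm.mem_iff, PySem.Set.mem_ofList]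
  have hpw : S.Pairwise (· ≤ ·) := PySem.List.sorted_pairwise (PySem.Set.ofList qd) (fun x => x)
  rw [List.max?_eq_some_iff]
  constructor
  · exact (hmemS _).mp (List.getLast_mem h)
  · intro b hb
    exact pvLeGetLast hpw h b ((hmemS b).mpr hb)

-- A computes find? at the max of the qualifying dates
theorem pvA_eq (rows : List (List (String × String))) (L : String) :
    previous_by_date_py rows L =
      match (pvQD rows L).max? with
      | none => none
      | some m => rows.find? (fun row => pvD row == m) := by
  show (if PySem.List.sorted (PySem.Set.ofList (pvQD rows L)) (fun x => x) false = [] then none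
        else rows.find? (fun row => pvD row ==
          PySem.List.pyGetD (PySem.List.sorted (PySem.Set.ofList (pvQD rows L)) (fun x => x) false) (-1) "")) = _
  by_cases h : PySem.List.sorted (PySem.Set.ofList (pvQD rows L)) (fun x => x) false = []
  · have hq0 : pvQD rows L = [] := (pvNilIff _).mp h
    rw [hq0]
    rfl
  · have hmax := pvMaxChar (pvQD rows L) h
    rw [hmax, PySem.List.pyGetD_neg_one _ _ h]
    simp [h]

-- ===== VERDICT (by name: the statement is the Claim_ definition above) =====
theorem previous_by_date_py_spec : Claim_equal_previous_by_date_py := by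
  intro rows L _
  show _ = _
  rw [pvAlt_eq_foldl, pvInv, pvA_eq, pvState]
  cases (pvQD rows L).max? <;> rfl
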